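-- pv_equiv track=rewrite | github.com/jaeminSon/problem_solving | baekjoon/잘못구현한에라토스테네스의체.py | sum_harmonic_seq
-- ===== SOURCE A (Python) =====
-- def sum_harmonic_seq(n):
--     # compute n//1 + n//2 + ... + n//n
--     s = 0
--     i=1
--     while i<=n:
--         j = n//(n//i)
--         s+=(n//i)*(j-i+1)
--         i = j+1
--     return s
-- ===== SOURCE B (Python) =====
-- def sum_harmonic_seq(n):
--     # compute n//1 + n//2 + ... + n//n via the hyperbola identity:
--     # D(n) = 2 * sum_{i<=sqrt(n)} n//i - floor(sqrt(n))**2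
--     if n <= 0:
--         return 0
--     m = 1
--     while (m + 1) * (m + 1) <= n:
--         m += 1
--     t = 0
--     for i in range(1, m + 1):
--         t += n // i
--     return 2 * t - m * m
-- ===== Notes on version B (the rewrite author's own statement) =====
-- stated objective: alternative
-- what changed: Replaced A's quotient-block jumping loop (which advances i past each block of equal quotients, adding quotient times block length) by the Dirichlet hyperbola identity: sum the quotients only up to the integer square root and return twice that partial sum minus the square of the root.
import Mathlib
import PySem

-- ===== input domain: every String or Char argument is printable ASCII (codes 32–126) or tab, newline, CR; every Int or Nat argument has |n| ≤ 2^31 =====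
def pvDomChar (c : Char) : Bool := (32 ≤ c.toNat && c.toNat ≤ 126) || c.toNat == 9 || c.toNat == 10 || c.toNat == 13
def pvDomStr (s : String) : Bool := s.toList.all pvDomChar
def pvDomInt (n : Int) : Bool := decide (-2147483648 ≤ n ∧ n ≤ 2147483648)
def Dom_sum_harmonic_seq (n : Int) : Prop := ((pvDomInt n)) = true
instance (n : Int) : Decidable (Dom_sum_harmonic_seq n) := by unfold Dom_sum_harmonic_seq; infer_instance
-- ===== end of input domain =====

-- B computes the same sum by the Dirichlet hyperbola identity (2·Σ_{i≤√n} n//i − ⌊√n⌋²)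
-- instead of A's quotient-block jumping; an alternative exact algorithm of similar cost.

-- ===== PORT A =====
-- the while loop of A; fuel is a totality guard only (each iteration increases i by
-- at least 1 while i ≤ n, so fuel n.toNat + 1 is never exhausted)
def sumHarmLoop (n : Int) : Nat → Int → Int → Int
  | 0, _, s => s
  | fuel+1, i, s =>
    if i ≤ n then
      let j := PySem.Int.floordiv n (PySem.Int.floordiv n i)
      sumHarmLoop n fuel (j + 1) (s + (PySem.Int.floordiv n i) * (j - i + 1))
    else s

def sum_harmonic_seq (n : Int) : Int := sumHarmLoop n (n.toNat + 1) 1 0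

-- ===== PORT B =====
-- the 'while (m+1)*(m+1) <= n: m += 1' loop of B; fuel n.toNat is a totality guard only
def isqrtLoop (n : Int) : Nat → Int → Int
  | 0, m => m
  | f+1, m => if (m + 1) * (m + 1) ≤ n then isqrtLoop n f (m + 1) else m

-- the 'for i in range(1, m+1): t += n // i' loop of B, counted by its c iterations
def altSumLoop (n : Int) : Nat → Int → Int → Int
  | 0, _, t => t
  | c+1, i, t => altSumLoop n c (i + 1) (t + PySem.Int.floordiv n i)

def sum_harmonic_seq_alt (n : Int) : Int :=
  if n ≤ 0 then 0
  else
    let m := isqrtLoop n n.toNat 1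
    2 * altSumLoop n m.toNat 1 0 - m * m

-- ===== PRECONDITION & SPEC =====
def Spec_sum_harmonic_seq (n : Int) (out : Int) : Prop := out = sum_harmonic_seq_alt n
instance (n : Int) (out : Int) : Decidable (Spec_sum_harmonic_seq n out) := by unfold Spec_sum_harmonic_seq; infer_instance

-- ===== CLAIM (what is proved, stated in full; the proofs are below) =====
def Claim_equal_sum_harmonic_seq : Prop := ∀ (n : Int), Dom_sum_harmonic_seq n → Spec_sum_harmonic_seq n (sum_harmonic_seq n)

-- ===== LEMMAS AND PROOFS =====

-- arithmetic facts about q = n//i and j = n//q for 1 ≤ i ≤ n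
lemma harm_q_pos {n i : Int} (h1 : 1 ≤ i) (h2 : i ≤ n) : 1 ≤ PySem.Int.floordiv n i := by
  rw [PySem.Int.le_floordiv_iff_mul_le (by omega)]; omega

lemma harm_i_le_j {n i : Int} (h1 : 1 ≤ i) (h2 : i ≤ n) :
    i ≤ PySem.Int.floordiv n (PySem.Int.floordiv n i) := by
  have hq := harm_q_pos h1 h2
  rw [PySem.Int.le_floordiv_iff_mul_le (by omega)]
  have := PySem.Int.floordiv_mul_add_mod n i
  have hm : 0 ≤ PySem.Int.mod n i := by
    rw [PySem.Int.mod_eq_emod_of_pos (by omega : (0:Int) < i)]; exact Int.emod_nonneg n (by omega)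
  nlinarith [this, hm]

lemma harm_j_le_n {n i : Int} (h1 : 1 ≤ i) (h2 : i ≤ n) :
    PySem.Int.floordiv n (PySem.Int.floordiv n i) ≤ n := by
  have hq := harm_q_pos h1 h2
  have : PySem.Int.floordiv n (PySem.Int.floordiv n i) < n + 1 := by
    rw [PySem.Int.floordiv_lt_iff_lt_mul (by omega)]
    nlinarith
  omega

lemma harm_block_const {n i k : Int} (h1 : 1 ≤ i) (h2 : i ≤ n)
    (hk1 : i ≤ k) (hk2 : k ≤ PySem.Int.floordiv n (PySem.Int.floordiv n i)) :
    PySem.Int.floordiv n k = PySem.Int.floordiv n i := by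
  have hq := harm_q_pos h1 h2
  have hge : PySem.Int.floordiv n i ≤ PySem.Int.floordiv n k := by
    rw [PySem.Int.le_floordiv_iff_mul_le (by omega)]
    have := (PySem.Int.le_floordiv_iff_mul_le (a := n) (b := PySem.Int.floordiv n i)
      (q := k) (by omega)).mp hk2
    nlinarith
  have hlt : PySem.Int.floordiv n k < PySem.Int.floordiv n i + 1 := by
    rw [PySem.Int.floordiv_lt_iff_lt_mul (by omega)]
    have hni := PySem.Int.floordiv_mul_add_mod n i
    have hm : PySem.Int.mod n i < i := by
      rw [PySem.Int.mod_eq_emod_of_pos (by omega : (0:Int) < i)]; exact Int.emod_lt_of_pos n (by omega)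
    nlinarith
  omega

-- A's loop from i computes s + Σ_{k=i..n} n//k, given enough fuel
lemma sumHarmLoop_eq (n : Int) : ∀ (fuel : Nat) (i s : Int), 1 ≤ i → (n + 1 - i).toNat ≤ fuel →
    sumHarmLoop n fuel i s =
      s + ((PySem.List.pyRange i (n + 1) 1).map (fun k => PySem.Int.floordiv n k)).sum := by
  intro fuel
  induction fuel with
  | zero =>
    intro i s hi hf
    have : n + 1 ≤ i := by omega
    rw [PySem.List.pyRange_one_eq_nil this]
    simp [sumHarmLoop]
  | succ fuel ih =>
    intro i s hi hf
    by_cases hin : i ≤ n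
    · set q := PySem.Int.floordiv n i with hqdef
      set j := PySem.Int.floordiv n q with hjdef
      have hq := harm_q_pos hi hin
      have hij : i ≤ j := harm_i_le_j hi hin
      have hjn : j ≤ n := harm_j_le_n hi hin
      rw [sumHarmLoop, if_pos hin, ← hqdef, ← hjdef]
      rw [ih (j + 1) _ (by omega) (by omega)]
      rw [PySem.List.pyRange_one_append i (j + 1) (n + 1) (by omega) (by omega)]
      rw [List.map_append, List.sum_append]
      have hconst : ((PySem.List.pyRange i (j + 1) 1).map (fun k => PySem.Int.floordiv n k))
          = (PySem.List.pyRange i (j + 1) 1).map (fun _ => q) := by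
        apply List.map_congr_left
        intro k hk
        rw [PySem.List.mem_pyRange_one] at hk
        have hk2 : k ≤ PySem.Int.floordiv n (PySem.Int.floordiv n i) := by
          rw [← hqdef, ← hjdef]; omega
        exact harm_block_const hi hin hk.1 hk2
      have hlen : ((PySem.List.pyRange i (j + 1) 1).length : Int) = j - i + 1 := by
        rw [PySem.List.length_pyRange_one]; omega
      rw [hconst, List.map_const', List.sum_replicate, nsmul_eq_mul, hlen]
      ring
    · rw [sumHarmLoop, if_neg hin]
      rw [PySem.List.pyRange_one_eq_nil (by omega)]
      simp

-- B's summation loop from i, for c steps, adds Σ_{k=i..i+c-1} n//k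
lemma altSumLoop_eq (n : Int) : ∀ (c : Nat) (i t : Int),
    altSumLoop n c i t = t + ((PySem.List.pyRange i (i + c) 1).map (fun k => PySem.Int.floordiv n k)).sum := by
  intro c
  induction c with
  | zero =>
    intro i t
    rw [PySem.List.pyRange_one_eq_nil (by omega)]
    simp [altSumLoop]
  | succ c ih =>
    intro i t
    rw [altSumLoop, ih]
    have hb : i + ((c : Int) + 1) = (i + 1) + c := by ring
    rw [show ((c + 1 : Nat) : Int) = (c : Int) + 1 by push_cast; ring, hb,
      PySem.List.pyRange_one_cons (by omega : i < (i + 1) + (c : Int))]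
    simp [add_assoc]

-- a list sum over range(1, N+1) is the Finset sum over Ioc 0 N
lemma pyRange_map_sum (f : Int → Int) (N : ℕ) :
    ((PySem.List.pyRange 1 ((N : Int) + 1) 1).map f).sum = ∑ k ∈ Finset.Ioc 0 N, f (k : Int) := by
  induction N with
  | zero => rw [PySem.List.pyRange_one_eq_nil (by omega)]; simp
  | succ N ih =>
    have hc : ((N + 1 : ℕ) : Int) + 1 = ((N : Int) + 1) + 1 := by push_cast; ring
    rw [hc, PySem.List.pyRange_one_succ_right (by omega), List.map_append, List.sum_append,
      Finset.sum_Ioc_succ_top (Nat.zero_le _), ih]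
    push_cast
    simp

-- Σ_{k∈Ioc 0 M} (N:ℤ)//k = ↑(Σ_{k∈Ioc 0 M} N/k)
lemma sum_floordiv_cast (N M : ℕ) :
    ∑ k ∈ Finset.Ioc 0 M, PySem.Int.floordiv (N : Int) ((k : ℕ) : Int)
      = ((∑ k ∈ Finset.Ioc 0 M, N / k : ℕ) : Int) := by
  rw [Nat.cast_sum]
  apply Finset.sum_congr rfl
  intro k hk
  rw [Finset.mem_Ioc] at hk
  rw [PySem.Int.floordiv_eq_ediv_of_pos (by exact_mod_cast hk.1)]
  exact (Int.natCast_div N k).symm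

-- B's isqrt loop computes Nat.sqrt
lemma isqrtLoop_eq (n : Int) (N : ℕ) (hN : n = (N : Int)) :
    ∀ (f : Nat) (m : ℕ), 1 ≤ m → m ≤ N.sqrt → N.sqrt ≤ m + f →
      isqrtLoop n f ((m : ℕ) : Int) = ((N.sqrt : ℕ) : Int) := by
  intro f
  induction f with
  | zero =>
    intro m _ h2 h3
    have : m = N.sqrt := by omega
    simp [isqrtLoop, this]
  | succ f ih =>
    intro m h1 h2 h3
    rw [isqrtLoop]
    by_cases hc : ((m : Int) + 1) * ((m : Int) + 1) ≤ n
    · rw [if_pos hc]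
      have hnat : (m + 1) * (m + 1) ≤ N := by
        rw [hN] at hc; exact_mod_cast hc
      have hms : m + 1 ≤ N.sqrt := Nat.le_sqrt.mpr hnat
      have := ih (m + 1) (by omega) hms (by omega)
      rw [show ((m : Int) + 1) = (((m + 1 : ℕ) : ℕ) : Int) by push_cast; ring]
      exact this
    · rw [if_neg hc]
      have hnat : ¬ (m + 1) * (m + 1) ≤ N := by
        intro h; apply hc; rw [hN]; exact_mod_cast h
      have : ¬ m + 1 ≤ N.sqrt := fun h => hnat (Nat.le_sqrt.mp h)
      have : m = N.sqrt := by omega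
      rw [this]

-- filter of an Ioc by an upper bound
lemma Ioc_filter_le (a b d : ℕ) :
    (Finset.Ioc a b).filter (fun x => x ≤ d) = Finset.Ioc a (min b d) := by
  ext x
  simp only [Finset.mem_filter, Finset.mem_Ioc, le_min_iff]
  omega

-- counting the column below the hyperbola: Σ_{q∈Ioc 0 c} [k·q ≤ N] = N/k  (when N/k ≤ c)
lemma hyp_col (N k c : ℕ) (hk : 0 < k) (h : N / k ≤ c) :
    ∑ q ∈ Finset.Ioc 0 c, (if k * q ≤ N then 1 else 0) = N / k := by
  have hcongr : ∀ q ∈ Finset.Ioc 0 c, (if k * q ≤ N then 1 else 0) = (if q ≤ N / k then 1 else 0) := by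
    intro q _
    have : k * q ≤ N ↔ q ≤ N / k := by
      rw [Nat.le_div_iff_mul_le hk, mul_comm]
    simp [this]
  rw [Finset.sum_congr rfl hcongr, ← Finset.card_filter, Ioc_filter_le,
    Nat.card_Ioc, min_eq_right h, Nat.sub_zero]

-- counting a row, truncated at s: Σ_{k∈Ioc s N} [k·q ≤ N] = N/q − s  (when s ≤ N/q)
lemma hyp_row (N q s : ℕ) (hq : 0 < q) (_h1 : s ≤ N / q) :
    ∑ k ∈ Finset.Ioc s N, (if k * q ≤ N then 1 else 0) = N / q - s := by
  have hcongr : ∀ k ∈ Finset.Ioc s N, (if k * q ≤ N then 1 else 0) = (if k ≤ N / q then 1 else 0) := by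
    intro k _
    have : k * q ≤ N ↔ k ≤ N / q := Iff.symm (Nat.le_div_iff_mul_le hq)
    simp [this]
  rw [Finset.sum_congr rfl hcongr, ← Finset.card_filter, Ioc_filter_le,
    Nat.card_Ioc, min_eq_right (Nat.div_le_self N q)]

-- the Dirichlet hyperbola identity: Σ_{k=1}^{N} N/k + ⌊√N⌋² = 2·Σ_{i=1}^{⌊√N⌋} N/i
lemma hyperbola (N : ℕ) (hN : 0 < N) :
    ∑ k ∈ Finset.Ioc 0 N, N / k + N.sqrt * N.sqrt = 2 * ∑ i ∈ Finset.Ioc 0 N.sqrt, N / i := by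
  set s := N.sqrt with hs
  have hs0 : 0 < s := Nat.sqrt_pos.mpr hN
  have hss : s * s ≤ N := Nat.sqrt_le N
  have hlt : N < (s + 1) * (s + 1) := Nat.lt_succ_sqrt N
  have hsN : s ≤ N := Nat.sqrt_le_self N
  rw [← Finset.sum_Ioc_consecutive (fun k => N / k) (Nat.zero_le s) hsN]
  -- reduce to: Σ_{k∈Ioc s N} N/k + s·s = Σ_{i∈Ioc 0 s} N/i
  suffices h : ∑ k ∈ Finset.Ioc s N, N / k + s * s = ∑ i ∈ Finset.Ioc 0 s, N / i by omega
  have hsmall : ∀ k, s < k → N / k ≤ s := by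
    intro k hk
    have h1 : N / k ≤ N / (s + 1) := Nat.div_le_div_left hk (by omega)
    have h2 : N / (s + 1) < s + 1 := (Nat.div_lt_iff_lt_mul (by omega)).mpr hlt
    omega
  have hbig : ∀ q, 0 < q → q ≤ s → s ≤ N / q := by
    intro q hq hqs
    rw [Nat.le_div_iff_mul_le hq]
    calc s * q ≤ s * s := Nat.mul_le_mul_left s hqs
    _ ≤ N := hss
  -- turn each N/k (k > s) into a truncated column count, then swap the sums
  have hstep : ∑ k ∈ Finset.Ioc s N, N / k
      = ∑ q ∈ Finset.Ioc 0 s, (N / q - s) := by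
    have h1 : ∀ k ∈ Finset.Ioc s N, N / k
        = ∑ q ∈ Finset.Ioc 0 s, (if k * q ≤ N then 1 else 0) := by
      intro k hk
      rw [Finset.mem_Ioc] at hk
      exact (hyp_col N k s (by omega) (hsmall k hk.1)).symm
    rw [Finset.sum_congr rfl h1, Finset.sum_comm]
    apply Finset.sum_congr rfl
    intro q hq
    rw [Finset.mem_Ioc] at hq
    exact hyp_row N q s hq.1 (hbig q hq.1 hq.2)
  rw [hstep]
  have hcard : s * s = ∑ _q ∈ Finset.Ioc 0 s, s := by
    rw [Finset.sum_const, Nat.card_Ioc, smul_eq_mul, Nat.sub_zero]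
  rw [hcard, ← Finset.sum_add_distrib]
  apply Finset.sum_congr rfl
  intro q hq
  rw [Finset.mem_Ioc] at hq
  have := hbig q hq.1 hq.2
  omega

-- ===== VERDICT (by name: the statement is the Claim_ definition above) =====
theorem sum_harmonic_seq_spec : Claim_equal_sum_harmonic_seq := by
  intro n _
  unfold Spec_sum_harmonic_seq sum_harmonic_seq sum_harmonic_seq_alt
  by_cases hn : n ≤ 0
  · rw [if_pos hn, sumHarmLoop_eq n (n.toNat + 1) 1 0 (by omega) (by omega),
      PySem.List.pyRange_one_eq_nil (by omega)]
    simp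
  · rw [if_neg hn]
    set N := n.toNat with hNdef
    have hN : n = (N : Int) := by omega
    have hN1 : 1 ≤ N := by omega
    set s := N.sqrt with hsdef
    have hs0 : 0 < s := Nat.sqrt_pos.mpr (by omega)
    -- the isqrt loop yields √N
    have hm : isqrtLoop n n.toNat 1 = ((s : ℕ) : Int) := by
      have := isqrtLoop_eq n N hN N ((1 : ℕ)) (le_refl 1) hs0
        (by have := Nat.sqrt_le_self N; omega)
      rw [show (((1 : ℕ) : ℕ) : Int) = 1 by norm_num] at this
      rw [show n.toNat = N from rfl]
      exact this
    show sumHarmLoop n (n.toNat + 1) 1 0 =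
      2 * altSumLoop n (isqrtLoop n n.toNat 1).toNat 1 0
        - isqrtLoop n n.toNat 1 * isqrtLoop n n.toNat 1
    rw [hm, show ((s : ℕ) : Int).toNat = s from by omega]
    -- both sides as Nat sums
    have hA : sumHarmLoop n (n.toNat + 1) 1 0
        = ((∑ k ∈ Finset.Ioc 0 N, N / k : ℕ) : Int) := by
      rw [sumHarmLoop_eq n (n.toNat + 1) 1 0 (by omega) (by omega), hN,
        pyRange_map_sum, ← hN]
      rw [hN, sum_floordiv_cast N N]
      simp
    have hB : altSumLoop n s 1 0
        = ((∑ i ∈ Finset.Ioc 0 s, N / i : ℕ) : Int) := by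
      rw [altSumLoop_eq n s 1 0, show (1 : Int) + (s : Int) = (s : Int) + 1 by ring,
        pyRange_map_sum, hN, sum_floordiv_cast N s]
      simp
    rw [hA, hB]
    have key := hyperbola N (by omega)
    rw [← hsdef] at key
    have key' : ((∑ k ∈ Finset.Ioc 0 N, N / k : ℕ) : Int) + (s : Int) * (s : Int)
        = 2 * ((∑ i ∈ Finset.Ioc 0 s, N / i : ℕ) : Int) := by exact_mod_cast key
    linarith
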